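-- pv_equiv track=rewrite | github.com/adit19shah/knockout-winner-predictor | knockout_tournament_predictor/views.py | valid_mask
-- ===== SOURCE A (Python) =====
-- def valid_mask(mask):
--     i = bin(mask).count('1')
--     if (i == 0):
--         return False
--
--     while i > 1:
--         if (i % 2 == 1):
--             return False  # number of bits not a power of 2
--         i = i // 2
--
--     # mask is a valid mask
--     return True
-- ===== SOURCE B (Python) =====
-- def valid_mask(mask):
--     i = bin(mask).count('1')
--     return i != 0 and (i & (i - 1)) == 0
-- ===== Notes on version B (the rewrite author's own statement) =====
-- stated objective: idiomatic
-- what changed: Replaces the halving while-loop power-of-two test on the popcount with the constant-time closed-form bit-trick test.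
import Mathlib
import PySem

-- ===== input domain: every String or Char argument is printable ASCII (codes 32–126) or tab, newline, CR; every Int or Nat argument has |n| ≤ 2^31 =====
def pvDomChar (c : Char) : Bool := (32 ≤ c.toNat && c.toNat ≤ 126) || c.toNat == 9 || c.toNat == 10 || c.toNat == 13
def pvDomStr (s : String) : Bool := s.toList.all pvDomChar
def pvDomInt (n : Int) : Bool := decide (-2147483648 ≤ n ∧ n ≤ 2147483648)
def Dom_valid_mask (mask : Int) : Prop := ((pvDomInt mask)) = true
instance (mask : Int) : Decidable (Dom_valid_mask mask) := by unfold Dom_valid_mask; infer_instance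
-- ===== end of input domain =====

-- B replaces A's halving while-loop power-of-two test on the popcount with the closed-form
-- bit-trick test (idiomatic; same results).


-- shared by both ports: Python's `i = bin(mask).count('1')` (the identical first line of A and B)
def popcountLine (mask : Int) : Nat := PySem.Str.count (PySem.Int.pyBin mask) "1"

-- ===== PORT A =====
-- the `while i > 1` loop of A, step for step
def validMaskLoop (i : Nat) : Bool :=
  if i > 1 then
    if i % 2 = 1 then false  -- number of bits not a power of 2
    else validMaskLoop (i / 2)
  else true
termination_by i
decreasing_by omega

def valid_mask (mask : Int) : Bool :=
  let i := popcountLine mask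
  if i = 0 then false
  else validMaskLoop i

-- ===== PORT B =====
def valid_mask_alt (mask : Int) : Bool :=
  let i := popcountLine mask
  i != 0 && (i &&& (i - 1)) == 0

-- ===== PRECONDITION & SPEC =====
def Spec_valid_mask (mask : Int) (out : Bool) : Prop := out = valid_mask_alt mask
instance (mask : Int) (out : Bool) : Decidable (Spec_valid_mask mask out) := by unfold Spec_valid_mask; infer_instance

-- ===== CLAIM (what is proved, stated in full; the proofs are below) =====
def Claim_equal_valid_mask : Prop := ∀ (mask : Int), Dom_valid_mask mask → Spec_valid_mask mask (valid_mask mask)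

-- ===== LEMMAS AND PROOFS =====

-- bit facts for the trick: for m ≥ 1, 2m & (2m-1) = 2·(m & (m-1)); (2m+1) & 2m = 2m
lemma land_even (m : Nat) (hm : 1 ≤ m) : (2 * m) &&& (2 * m - 1) = 2 * (m &&& (m - 1)) := by
  have h : 2 * m - 1 = 2 * (m - 1) + 1 := by omega
  apply Nat.eq_of_testBit_eq
  intro j
  rw [Nat.testBit_land]
  cases j with
  | zero => simp [h, Nat.testBit_zero, Nat.mul_mod_right]
  | succ j =>
      rw [Nat.testBit_succ, Nat.testBit_succ, Nat.testBit_succ, h,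
        Nat.mul_div_cancel_left _ (by omega : 0 < 2),
        Nat.mul_add_div (by omega : 0 < 2),
        Nat.mul_div_cancel_left _ (by omega : 0 < 2), Nat.testBit_land]
      norm_num

lemma land_odd (m : Nat) : (2 * m + 1) &&& (2 * m) = 2 * m := by
  apply Nat.eq_of_testBit_eq
  intro j
  rw [Nat.testBit_land]
  cases j with
  | zero => simp [Nat.testBit_zero, Nat.mul_mod_right]
  | succ j =>
      rw [Nat.testBit_succ, Nat.testBit_succ,
        Nat.mul_add_div (by omega : 0 < 2),
        Nat.mul_div_cancel_left _ (by omega : 0 < 2)]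
      norm_num

lemma loop_eq_trick : ∀ i : Nat, 1 ≤ i → validMaskLoop i = ((i &&& (i - 1)) == 0) := by
  intro i
  induction i using Nat.strong_induction_on with
  | _ i ih =>
    intro hi
    rcases Nat.lt_or_ge i 2 with h2 | h2
    · have h1 : i = 1 := by omega
      subst h1
      rw [validMaskLoop]
      simp
    · rw [validMaskLoop]
      by_cases hpar : i % 2 = 1
      · -- odd case: loop returns false; i & (i-1) = i - 1 ≠ 0
        simp only [if_pos (by omega : i > 1), if_pos hpar]
        have hm : i = 2 * (i / 2) + 1 := by omega
        have := land_odd (i / 2)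
        rw [← hm, show 2 * (i / 2) = i - 1 by omega] at this
        rw [this]
        have hne : ¬ (i - 1 = 0) := by omega
        simp [hne]
      · -- even case: recurse on i / 2
        simp only [if_pos (by omega : i > 1), if_neg hpar]
        have hm : i = 2 * (i / 2) := by omega
        have hm1 : 1 ≤ i / 2 := by omega
        rw [ih (i / 2) (by omega) hm1]
        have := land_even (i / 2) hm1
        rw [← hm] at this
        rw [this]
        generalize (i / 2) &&& (i / 2 - 1) = x
        cases x <;> simp

-- ===== VERDICT (by name: the statement is the Claim_ definition above) =====
theorem valid_mask_spec : Claim_equal_valid_mask := by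
  intro mask _
  unfold Spec_valid_mask valid_mask valid_mask_alt
  set i := popcountLine mask with hi
  by_cases h0 : i = 0
  · simp [h0]
  · have h1 : 1 ≤ i := by omega
    simp only [if_neg h0, loop_eq_trick i h1]
    simp [h0]
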